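-- pv_equiv track=rewrite | github.com/labinxu/code | python/icase/utils/transferImei.py | transImei
-- ===== SOURCE A (Python) =====
-- def transImei(imei):
--     if 'A' in imei:
--         imei = list(imei)
--         size = len(imei)
--         for i in range(0, size, 2):
--             if i+1 < size:
--                 imei[i], imei[i+1] = imei[i+1], imei[i]
--     return ''.join(imei[1:])
-- ===== SOURCE B (Python) =====
-- def transImei(imei):
--     if 'A' not in imei:
--         return imei[1:]
--     out = []
--     it = iter(imei)
--     for a in it:
--         b = next(it, '')
--         out.append(b + a)  # swapped pair; lone final char stays as is
--     return ''.join(out)[1:]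
-- ===== Notes on version B (the rewrite author's own statement) =====
-- stated objective: alternative
-- what changed: A mutates a list in place, swapping by index over range(0, size, 2); B makes one pass over an iterator, consuming characters two at a time and emitting each pair swapped, with an early return when the marker character is absent.
import Mathlib
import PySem

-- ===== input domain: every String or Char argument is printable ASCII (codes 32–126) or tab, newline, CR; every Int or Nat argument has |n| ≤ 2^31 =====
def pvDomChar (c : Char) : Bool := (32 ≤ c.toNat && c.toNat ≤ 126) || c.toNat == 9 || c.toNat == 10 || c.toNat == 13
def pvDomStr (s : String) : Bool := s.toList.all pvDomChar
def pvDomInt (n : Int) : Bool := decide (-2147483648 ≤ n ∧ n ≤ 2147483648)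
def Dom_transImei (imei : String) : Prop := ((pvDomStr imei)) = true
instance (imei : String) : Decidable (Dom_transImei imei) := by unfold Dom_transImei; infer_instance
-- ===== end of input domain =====

-- B replaces A's in-place index-swapping loop over range(0, size, 2) by a single
-- pass that consumes the characters two at a time and emits each pair swapped
-- (objective: alternative decomposition, same O(n) cost).

-- ===== PORT A =====
-- one iteration of A's loop body: the swap at index i (guarded by i+1 < size).
-- i comes from range(0, size, 2), so 0 ≤ i, and the guard gives i+1 < size:
-- getD / set at i.toNat, i.toNat+1 are exact for Python's imei[i], imei[i+1] here.
def transImeiStep (l : List Char) (i : Int) : List Char :=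
  if i + 1 < (l.length : Int) then
    let a := l.getD i.toNat ' '
    let b := l.getD (i.toNat + 1) ' '
    (l.set i.toNat b).set (i.toNat + 1) a
  else l

def transImei (imei : String) : String :=
  -- 'A' in imei: single-character membership, exactly List.contains on the chars
  if imei.toList.contains 'A' then
    let cs := imei.toList                 -- imei = list(imei)
    let size : Int := cs.length           -- size = len(imei)
    let cs := (PySem.List.pyRange 0 size 2).foldl transImeiStep cs
    String.ofList (cs.drop 1)                 -- ''.join(imei[1:])
  else
    String.ofList (imei.toList.drop 1)        -- ''.join(imei[1:]) on the untouched string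

-- ===== PORT B =====
-- Source B's loop: take a then b = next(it, ''), append b + a; a lone final char stays.
def pairSwap : List Char → List Char
  | [] => []
  | [a] => [a]
  | a :: b :: t => b :: a :: pairSwap t

def transImei_alt (imei : String) : String :=
  if imei.toList.contains 'A' then
    String.ofList ((pairSwap imei.toList).drop 1)   -- ''.join(out)[1:]
  else
    String.ofList (imei.toList.drop 1)              -- early return imei[1:]

-- ===== PRECONDITION & SPEC =====
def Spec_transImei (imei : String) (out : String) : Prop := out = transImei_alt imei
instance (imei : String) (out : String) : Decidable (Spec_transImei imei out) := by unfold Spec_transImei; infer_instance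

-- ===== CLAIM (what is proved, stated in full; the proofs are below) =====
def Claim_equal_transImei : Prop := ∀ (imei : String), Dom_transImei imei → Spec_transImei imei (transImei imei)

-- ===== LEMMAS AND PROOFS =====

lemma step_shift (x y : Char) (l : List Char) (i : Int) (h : 0 ≤ i) :
    transImeiStep (x :: y :: l) (i + 2) = x :: y :: transImeiStep l i := by
  have ht : (i + 2).toNat = i.toNat + 2 := by omega
  simp only [transImeiStep, List.length_cons, ht]
  by_cases hc : i + 1 < (l.length : Int)
  · have hc' : i + 2 + 1 < ((l.length : Int) + 1 + 1) := by omega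
    simp [hc, hc', List.getD, List.set]
  · have hc' : ¬ (i + 2 + 1 < ((l.length : Int) + 1 + 1)) := by omega
    simp [hc, hc']

lemma foldl_shift (R : List Int) (x y : Char) (l : List Char)
    (hR : ∀ i ∈ R, 0 ≤ i) :
    (R.map (· + 2)).foldl transImeiStep (x :: y :: l) = x :: y :: R.foldl transImeiStep l := by
  induction R generalizing l with
  | nil => simp
  | cons i R ih =>
    simp only [List.map_cons, List.foldl_cons]
    rw [step_shift x y l i (hR i (by simp))]
    exact ih _ (fun j hj => hR j (by simp [hj]))

lemma pyRange_two_cons (n : Int) (h : 2 ≤ n) :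
    PySem.List.pyRange 0 n 2 = 0 :: (PySem.List.pyRange 0 (n - 2) 2).map (· + 2) := by
  rw [PySem.List.pyRange_of_pos 0 n (by norm_num), PySem.List.pyRange_of_pos 0 (n - 2) (by norm_num)]
  have h1 : (0 : Int) < n := by omega
  have hcnt : (if (0:Int) < n then ((n - 0 + 2 - 1) / 2).toNat else 0)
      = (if (0:Int) < n - 2 then ((n - 2 - 0 + 2 - 1) / 2).toNat else 0) + 1 := by
    split_ifs <;> omega
  rw [hcnt, List.range_succ_eq_map]
  simp only [List.map_cons, List.map_map]
  congr 1

lemma loop_eq_pairSwap (l : List Char) :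
    (PySem.List.pyRange 0 (l.length : Int) 2).foldl transImeiStep l = pairSwap l := by
  induction l using pairSwap.induct with
  | case1 =>
    simp only [List.length_nil, Nat.cast_zero]
    rw [PySem.List.pyRange_of_pos 0 0 (s := 2) (by norm_num)]
    simp [pairSwap]
  | case2 a =>
    have : (([a] : List Char).length : Int) = 1 := by norm_num
    rw [this, PySem.List.pyRange_of_pos 0 1 (s := 2) (by norm_num)]
    norm_num [pairSwap, transImeiStep]
  | case3 a b t ih =>
    have hlen : ((a :: b :: t).length : Int) = (t.length : Int) + 2 := by
      simp; omega
    rw [hlen, pyRange_two_cons _ (by omega)]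
    simp only [List.foldl_cons]
    have hstep0 : transImeiStep (a :: b :: t) 0 = b :: a :: t := by
      simp [transImeiStep, List.set]
    rw [hstep0]
    have hsub : (t.length : Int) + 2 - 2 = (t.length : Int) := by ring
    rw [hsub, foldl_shift _ b a t
      (fun i hi => ((PySem.List.mem_pyRange_iff_of_pos (by norm_num) i).mp hi).1)]
    rw [ih, pairSwap]

-- ===== VERDICT (by name: the statement is the Claim_ definition above) =====
theorem transImei_spec : Claim_equal_transImei := by
  intro imei _
  unfold Spec_transImei transImei transImei_alt
  by_cases h : imei.toList.contains 'A'
  · simp only [h, if_true]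
    rw [loop_eq_pairSwap]
  · rw [if_neg h, if_neg h]
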